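-- pv_equiv track=rewrite | github.com/onestone11/kosa-study-tigger | 엄마호랑이반/8주차 문제/박정환/삼각달팽이.py | solution
-- ===== SOURCE A (Python) =====
-- def solution(n):
--     answer = []
--     a = [[0] * n for i in range(n)]
--     x , y = -1, 0
--     num = 1
--
--     for i in range(n):
--         # 0, 1, 2, 3
--         for _ in range(i, n):
--             if i % 3 == 0:
--                 x += 1
--             elif i % 3 == 1:
--                 y += 1
--             else:
--                 x -= 1
--                 y -= 1
--             a[x][y] = num
--             num+=1
--
--     for i in range(n):
--         for j in range(i+1):
--             answer.append(a[i][j])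
--     return answer
-- ===== SOURCE B (Python) =====
-- def _cell(n, i, j):
--     # Closed-form value of the spiral at lower-triangle cell (i, j): the cell's
--     # ring is r = min(j, n-1-i, i-j); the sub-triangle of that ring has side
--     # m = n - 3*r and starts after s = T(n) - T(m) already-placed numbers; the
--     # local coordinates (ii, jj) pick one of the three ring edges.
--     r = min(j, n - 1 - i, i - j)
--     m = n - 3 * r
--     s = n * (n + 1) // 2 - m * (m + 1) // 2
--     ii, jj = i - 2 * r, j - r
--     if jj == 0:
--         return s + ii + 1
--     if ii == m - 1:
--         return s + m + jj
--     return s + 3 * m - 2 - ii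
--
-- def solution(n):
--     return [_cell(n, i, j) for i in range(n) for j in range(i + 1)]
-- ===== Notes on version B (the rewrite author's own statement) =====
-- stated objective: alternative
-- what changed: Replaces A's simulated spiral walk over a mutable n-by-n grid (per-cell stepping of x,y,num under an i%3 if-chain, then a readout pass) by a direct closed-form per cell: each lower-triangle cell (i,j) lies on ring r = min(j, n-1-i, i-j) and its value is computed arithmetically from the ring's triangular-number offset and which of the three ring edges the cell is on; no grid is built and nothing is walked.
import Mathlib
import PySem

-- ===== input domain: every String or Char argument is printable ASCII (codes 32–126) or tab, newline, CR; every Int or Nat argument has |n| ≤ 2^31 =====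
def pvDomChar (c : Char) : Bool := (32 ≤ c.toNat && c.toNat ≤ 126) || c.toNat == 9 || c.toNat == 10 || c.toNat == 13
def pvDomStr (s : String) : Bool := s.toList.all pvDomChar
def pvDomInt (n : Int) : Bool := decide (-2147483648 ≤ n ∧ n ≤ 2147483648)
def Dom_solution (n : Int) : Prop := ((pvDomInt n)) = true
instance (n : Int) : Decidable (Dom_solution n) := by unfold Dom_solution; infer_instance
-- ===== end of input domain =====

-- B replaces A's simulated spiral walk over a mutable n×n grid with a closed-form
-- per-cell value (ring index + triangular-number offset); equal return values.

-- ===== PORT A =====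
-- helper for Python "a[x][y] = v" (nested list item assignment, Python negative-index rule;
-- during A's walk the indices are always in range, so the IndexError branches never fire)
def pySet2 (a : List (List Int)) (x y : Int) (v : Int) : List (List Int) :=
  match PySem.List.pyGet? a x with
  | some row => PySem.List.pySetD a x (PySem.List.pySetD row y v)
  | none => a

-- helper for Python "a[i][j]" (read; in A's readout the indices are always in range, default unused)
def pyGet2 (a : List (List Int)) (i j : Int) : Int :=
  ((PySem.List.pyGet? a i).bind (fun r => PySem.List.pyGet? r j)).getD 0

def solution (n : Int) : List Int :=
  -- a = [[0] * n for i in range(n)]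
  let a0 : List (List Int) := (PySem.List.pyRange 0 n).map (fun _ => List.replicate n.toNat (0 : Int))
  -- x, y = -1, 0 ; num = 1 ; the two nested for-loops mutating (a, x, y, num)
  let st := (PySem.List.pyRange 0 n).foldl
    (fun (st : List (List Int) × Int × Int × Int) i =>
      (PySem.List.pyRange i n).foldl
        (fun st2 _ =>
          let xy : Int × Int :=
            if PySem.Int.mod i 3 = 0 then (st2.2.1 + 1, st2.2.2.1)
            else if PySem.Int.mod i 3 = 1 then (st2.2.1, st2.2.2.1 + 1)
            else (st2.2.1 - 1, st2.2.2.1 - 1)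
          (pySet2 st2.1 xy.1 xy.2 st2.2.2.2, xy.1, xy.2, st2.2.2.2 + 1))
        st)
    (a0, -1, 0, 1)
  -- answer.append(a[i][j]) loops
  (PySem.List.pyRange 0 n).foldl
    (fun ans i => (PySem.List.pyRange 0 (i + 1)).foldl
      (fun ans j => ans ++ [pyGet2 st.1 i j]) ans)
    []

-- ===== PORT B =====
-- _cell(n, i, j) of Source B: closed-form value at lower-triangle cell (i, j)
def cellB (n i j : Int) : Int :=
  let r := min (min j (n - 1 - i)) (i - j)
  let m := n - 3 * r
  let s := PySem.Int.floordiv (n * (n + 1)) 2 - PySem.Int.floordiv (m * (m + 1)) 2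
  let ii := i - 2 * r
  let jj := j - r
  if jj = 0 then s + ii + 1
  else if ii = m - 1 then s + m + jj
  else s + 3 * m - 2 - ii

-- [ _cell(n, i, j) for i in range(n) for j in range(i + 1) ]
def solution_alt (n : Int) : List Int :=
  (PySem.List.pyRange 0 n).flatMap
    (fun i => (PySem.List.pyRange 0 (i + 1)).map (fun j => cellB n i j))

-- ===== PRECONDITION & SPEC =====
def Spec_solution (n : Int) (out : List Int) : Prop := out = solution_alt n
instance (n : Int) (out : List Int) : Decidable (Spec_solution n out) := by unfold Spec_solution; infer_instance

-- ===== CLAIM (what is proved, stated in full; the proofs are below) =====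
def Claim_equal_solution : Prop := ∀ (n : Int), Dom_solution n → Spec_solution n (solution n)

-- ===== LEMMAS AND PROOFS =====

-- direction of leg i (i % 3), mirroring A's if-chain
def dirOf (m : Int) : Int × Int := if m = 0 then (1, 0) else if m = 1 then (0, 1) else (-1, -1)

-- the writes of one leg: starting BEFORE position p, direction d, first value num, length L
def legW (p d : Int × Int) (num : Int) : Nat → List ((Int × Int) × Int)
  | 0 => []
  | L + 1 => ((p.1 + d.1, p.2 + d.2), num) :: legW (p.1 + d.1, p.2 + d.2) d (num + 1) L

-- state after the first m legs: (position, next value, all writes so far)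
def legsSt (n : Int) : Nat → ((Int × Int) × Int × List ((Int × Int) × Int))
  | 0 => ((-1, 0), 1, [])
  | m + 1 =>
    let s := legsSt n m
    let d := dirOf (PySem.Int.mod (m : Int) 3)
    let L := (n - (m : Int)).toNat
    ((s.1.1 + L * d.1, s.1.2 + L * d.2), s.2.1 + L, s.2.2 ++ legW s.1 d s.2.1 L)

-- last write among w at key k
def fw (w : List ((Int × Int) × Int)) (k : Int × Int) : Option Int :=
  (w.reverse.find? (fun e => e.1 == k)).map (·.2)

def applyW (w : List ((Int × Int) × Int)) (a : List (List Int)) : List (List Int) :=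
  w.foldl (fun a e => pySet2 a e.1.1 e.1.2 e.2) a

-- jagged shape: N rows, row k has ℓ k entries
def Shape (N : Nat) (ℓ : Nat → Nat) (a : List (List Int)) : Prop :=
  a.length = N ∧ ∀ (k : Nat) (h : k < a.length), (a[k]).length = ℓ k

-- closed form of the leg-start position (position BEFORE leg m)
def posF (n : Int) (m : Nat) : Int × Int :=
  let q : Int := (m / 3 : Nat)
  match m % 3 with
  | 0 => (2 * q - 1, q)
  | 1 => (n - 1 - q, q)
  | _ => (n - 1 - q, n - 1 - 2 * q)

-- key and value of the k-th write of leg m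
def wKey (n : Int) (m k : Nat) : Int × Int :=
  ((posF n m).1 + ((k : Int) + 1) * (dirOf ((m % 3 : Nat) : Int)).1,
   (posF n m).2 + ((k : Int) + 1) * (dirOf ((m % 3 : Nat) : Int)).2)

def wVal (n : Int) (m k : Nat) : Int := (legsSt n m).2.1 + k

theorem fw_cons (e : (Int × Int) × Int) (w : List ((Int × Int) × Int)) (k : Int × Int) :
    fw (e :: w) k = (fw w k).or (if e.1 = k then some e.2 else none) := by
  simp only [fw, List.reverse_cons, List.find?_append, Option.map_or]
  by_cases h : e.1 = k
  · have hb : (e.1 == k) = true := by simp [h]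
    simp [List.find?, h]
  · have hb : (e.1 == k) = false := by simp [h]
    simp [List.find?, hb, h]

theorem pyIdx?_of_nonneg_lt {N : Nat} {t : Int} (h0 : 0 ≤ t) (h1 : t < (N : Int)) :
    PySem.List.pyIdx? N t = some t.toNat := by
  simp [PySem.List.pyIdx?, h0, h1]

theorem pyIdx?_of_ge {N : Nat} {t : Int} (h0 : 0 ≤ t) (h1 : (N : Int) ≤ t) :
    PySem.List.pyIdx? N t = none := by
  simp [PySem.List.pyIdx?, h0]
  omega

theorem shape_pySet2 {N : Nat} {ℓ : Nat → Nat} {a : List (List Int)} (h : Shape N ℓ a)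
    (x y v : Int) : Shape N ℓ (pySet2 a x y v) := by
  obtain ⟨hlen, hrows⟩ := h
  unfold pySet2
  rcases hres : PySem.List.pyGet? a x with _ | row
  · exact ⟨hlen, hrows⟩
  · unfold PySem.List.pyGet? at hres
    rcases hidx : PySem.List.pyIdx? a.length x with _ | kx
    · rw [hidx] at hres; simp at hres
    · rw [hidx] at hres
      simp only [Option.bind_some] at hres
      obtain ⟨hkx, hrow⟩ := List.getElem?_eq_some_iff.mp hres
      unfold PySem.List.pySetD PySem.List.pySet?
      rw [hidx]
      simp only [Option.map_some, Option.getD_some]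
      refine ⟨by simpa using hlen, ?_⟩
      intro k hk
      have hk' : k < a.length := by simpa using hk
      rw [List.getElem_set]
      by_cases hkk : kx = k
      · rw [if_pos hkk]
        have hlr : ((Option.map (fun q => row.set q v) (PySem.List.pyIdx? row.length y)).getD row).length
            = row.length := by
          rcases hy2 : PySem.List.pyIdx? row.length y with _ | ky <;> simp
        rw [hlr, ← hrow]
        subst hkk
        exact hrows kx hkx
      · rw [if_neg hkk]
        exact hrows k hk'

theorem pyGet2_pySet2 {N : Nat} {ℓ : Nat → Nat} {a : List (List Int)} (h : Shape N ℓ a)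
    {x y : Int} (hx : 0 ≤ x) (hx2 : x < N) (hy : 0 ≤ y) (hy2 : y < (ℓ x.toNat : Int))
    {i j : Int} (hi : 0 ≤ i) (hj : 0 ≤ j) (v : Int) :
    pyGet2 (pySet2 a x y v) i j = if (x, y) = (i, j) then v else pyGet2 a i j := by
  obtain ⟨hlen, hrows⟩ := h
  have hxa : x < (a.length : Int) := by rw [hlen]; exact hx2
  have hxN : x.toNat < a.length := by omega
  set row := a[x.toNat] with hrowdef
  have hrl : row.length = ℓ x.toNat := hrows x.toNat hxN
  have hya : y < (row.length : Int) := by rw [hrl]; exact hy2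
  have hax : PySem.List.pyIdx? a.length x = some x.toNat :=
    pyIdx?_of_nonneg_lt hx (by exact_mod_cast hxa)
  have hget : PySem.List.pyGet? a x = some row := by
    unfold PySem.List.pyGet?
    rw [hax]
    simp only [Option.bind_some]
    rw [List.getElem?_eq_getElem hxN]
  have hsetrow : PySem.List.pySetD row y v = row.set y.toNat v := by
    unfold PySem.List.pySetD PySem.List.pySet?
    have hay : PySem.List.pyIdx? row.length y = some y.toNat :=
      pyIdx?_of_nonneg_lt hy (by exact_mod_cast hya)
    rw [hay]
    rfl
  have hset : pySet2 a x y v = a.set x.toNat (row.set y.toNat v) := by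
    unfold pySet2
    rw [hget]
    dsimp only
    rw [hsetrow]
    unfold PySem.List.pySetD PySem.List.pySet?
    rw [hax]
    rfl
  rw [hset]
  unfold pyGet2 PySem.List.pyGet?
  have hlen' : (a.set x.toNat (row.set y.toNat v)).length = a.length := by simp
  have hrl' : (row.set y.toNat v).length = row.length := by simp
  by_cases hiN : i < (N : Int)
  · have hiN' : i.toNat < a.length := by omega
    have hai : PySem.List.pyIdx? a.length i = some i.toNat := by
      rw [hlen]; exact pyIdx?_of_nonneg_lt hi hiN
    have hai' : PySem.List.pyIdx? (a.set x.toNat (row.set y.toNat v)).length i = some i.toNat := by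
      rw [hlen']; exact hai
    rw [hai, hai']
    simp only [Option.bind_some]
    by_cases hxi : x = i
    · subst hxi
      have hq : a[x.toNat]? = some row := by rw [List.getElem?_eq_getElem hxN]
      rw [List.getElem?_set, if_pos rfl, if_pos hxN, hq]
      simp only [Option.bind_some]
      by_cases hjN : j < (ℓ x.toNat : Int)
      · have hrj : PySem.List.pyIdx? row.length j = some j.toNat := by
          rw [hrl]; exact pyIdx?_of_nonneg_lt hj hjN
        have hrj' : PySem.List.pyIdx? (row.set y.toNat v).length j = some j.toNat := by
          rw [hrl']; exact hrj
        rw [hrj, hrj']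
        simp only [Option.bind_some]
        by_cases hyj : y = j
        · subst hyj
          rw [List.getElem?_set, if_pos rfl, if_pos (by omega : y.toNat < row.length),
            if_pos rfl]
          simp
        · rw [List.getElem?_set, if_neg (by omega : ¬ y.toNat = j.toNat),
            if_neg (by simp [Prod.ext_iff, hyj])]
      · have h1 : PySem.List.pyIdx? row.length j = none := by
          rw [hrl]; exact pyIdx?_of_ge hj (by omega)
        have h2 : PySem.List.pyIdx? (row.set y.toNat v).length j = none := by
          rw [hrl']; exact h1
        rw [h1, h2, if_neg (by intro hc; rw [Prod.ext_iff] at hc; omega)]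
        simp
    · rw [List.getElem?_set, if_neg (by omega : ¬ x.toNat = i.toNat),
        if_neg (by intro hc; rw [Prod.ext_iff] at hc; exact hxi hc.1)]
  · have h1 : PySem.List.pyIdx? (a.set x.toNat (row.set y.toNat v)).length i = none := by
      rw [hlen', hlen]; exact pyIdx?_of_ge hi (by omega)
    have h2 : PySem.List.pyIdx? a.length i = none := by
      rw [hlen]; exact pyIdx?_of_ge hi (by omega)
    rw [h1, h2, if_neg (by intro hc; rw [Prod.ext_iff] at hc; omega)]
    simp

theorem pyGet2_applyW {N : Nat} {ℓ : Nat → Nat} (w : List ((Int × Int) × Int))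
    {a : List (List Int)} (h : Shape N ℓ a)
    (hw : ∀ e ∈ w, 0 ≤ e.1.1 ∧ e.1.1 < N ∧ 0 ≤ e.1.2 ∧ e.1.2 < (ℓ e.1.1.toNat : Int))
    {i j : Int} (hi : 0 ≤ i) (hj : 0 ≤ j) :
    pyGet2 (applyW w a) i j = (fw w (i, j)).getD (pyGet2 a i j) := by
  induction w generalizing a with
  | nil => simp [applyW, fw]
  | cons e w ih =>
    obtain ⟨⟨ex, ey⟩, ev⟩ := e
    obtain ⟨he, hw'⟩ := List.forall_mem_cons.mp hw
    have hsh := shape_pySet2 h ex ey ev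
    have hstep : applyW (((ex, ey), ev) :: w) a = applyW w (pySet2 a ex ey ev) := rfl
    rw [hstep, ih hsh hw', fw_cons,
      pyGet2_pySet2 h he.1 he.2.1 he.2.2.1 he.2.2.2 hi hj]
    rcases hf : fw w (i, j) with _ | v
    · by_cases hek : (ex, ey) = (i, j)
      · simp [hek, Option.or]
      · simp [hek, Option.or]
    · simp [Option.or]

theorem legW_eq_map (d : Int × Int) (L : Nat) :
    ∀ (p : Int × Int) (num : Int), legW p d num L =
      (List.range L).map (fun (k : Nat) => ((p.1 + ((k : Int) + 1) * d.1, p.2 + ((k : Int) + 1) * d.2), num + (k : Int))) := by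
  induction L with
  | zero => intro p num; simp [legW]
  | succ L ih =>
    intro p num
    rw [legW, ih, List.range_succ_eq_map, List.map_cons, List.map_map]
    refine List.cons_eq_cons.mpr ⟨?_, ?_⟩
    · norm_num
    · apply List.map_congr_left
      intro k _
      simp only [Function.comp_apply, Prod.mk.injEq]
      push_cast
      refine ⟨⟨by ring, by ring⟩, by ring⟩

theorem mod3_natCast (m : Nat) : PySem.Int.mod (m : Int) 3 = ((m % 3 : Nat) : Int) := by
  rw [PySem.Int.mod_eq_emod_of_pos (by norm_num)]
  omega

theorem applyW_append (w1 w2 : List ((Int × Int) × Int)) (a : List (List Int)) :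
    applyW (w1 ++ w2) a = applyW w2 (applyW w1 a) := by
  simp [applyW, List.foldl_append]

theorem foldl_append_singleton {α β : Type} (f : α → β) (l : List α) (acc : List β) :
    l.foldl (fun acc x => acc ++ [f x]) acc = acc ++ l.map f := by
  induction l generalizing acc with
  | nil => simp
  | cons x l ih => simp [ih]

theorem flatMap_congr {α β : Type} {f g : α → List β} {l : List α}
    (h : ∀ a ∈ l, f a = g a) : l.flatMap f = l.flatMap g := by
  induction l with
  | nil => rfl
  | cons x l ih =>
    simp only [List.flatMap_cons]
    rw [h x List.mem_cons_self, ih (fun a ha => h a (List.mem_cons_of_mem x ha))]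

theorem stepIf (i x y : Int) :
    (if PySem.Int.mod i 3 = 0 then (x + 1, y)
     else if PySem.Int.mod i 3 = 1 then (x, y + 1)
     else (x - 1, y - 1))
    = (x + (dirOf (PySem.Int.mod i 3)).1, y + (dirOf (PySem.Int.mod i 3)).2) := by
  unfold dirOf
  split_ifs <;> refine Prod.ext ?_ ?_ <;> dsimp <;> ring

theorem innerA (i : Int) (l : List Int) :
    ∀ (a : List (List Int)) (x y num : Int),
      l.foldl (fun st2 _ =>
        let xy : Int × Int :=
          if PySem.Int.mod i 3 = 0 then (st2.2.1 + 1, st2.2.2.1)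
          else if PySem.Int.mod i 3 = 1 then (st2.2.1, st2.2.2.1 + 1)
          else (st2.2.1 - 1, st2.2.2.1 - 1)
        (pySet2 st2.1 xy.1 xy.2 st2.2.2.2, xy.1, xy.2, st2.2.2.2 + 1)) (a, x, y, num)
      = (applyW (legW (x, y) (dirOf (PySem.Int.mod i 3)) num l.length) a,
         x + l.length * (dirOf (PySem.Int.mod i 3)).1,
         y + l.length * (dirOf (PySem.Int.mod i 3)).2,
         num + l.length) := by
  induction l with
  | nil => intro a x y num; simp [legW, applyW]
  | cons e l ih =>
    intro a x y num
    rw [List.foldl_cons]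
    dsimp only
    rw [stepIf i x y]
    dsimp only
    rw [ih]
    simp only [legW, applyW, List.foldl_cons, List.length_cons]
    refine Prod.ext ?_ (Prod.ext ?_ (Prod.ext ?_ ?_)) <;> dsimp <;> ring

theorem outerA (n : Int) (a0 : List (List Int)) :
    ∀ m : Nat, (m : Int) ≤ n →
      (PySem.List.pyRange 0 (m : Int)).foldl
        (fun (st : List (List Int) × Int × Int × Int) i =>
          (PySem.List.pyRange i n).foldl
            (fun st2 _ =>
              let xy : Int × Int :=
                if PySem.Int.mod i 3 = 0 then (st2.2.1 + 1, st2.2.2.1)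
                else if PySem.Int.mod i 3 = 1 then (st2.2.1, st2.2.2.1 + 1)
                else (st2.2.1 - 1, st2.2.2.1 - 1)
              (pySet2 st2.1 xy.1 xy.2 st2.2.2.2, xy.1, xy.2, st2.2.2.2 + 1))
            st)
        (a0, -1, 0, 1)
      = (applyW (legsSt n m).2.2 a0, (legsSt n m).1.1, (legsSt n m).1.2, (legsSt n m).2.1) := by
  intro m
  induction m with
  | zero =>
    intro _
    rw [PySem.List.pyRange_one_eq_nil (by norm_num)]
    simp [legsSt, applyW]
  | succ m ih =>
    intro hm1
    have hm : (m : Int) ≤ n := by push_cast at hm1 ⊢; omega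
    have hcast : ((m + 1 : Nat) : Int) = (m : Int) + 1 := by push_cast; ring
    rw [hcast, PySem.List.pyRange_one_succ_right (by positivity), List.foldl_append, ih hm]
    rw [List.foldl_cons, List.foldl_nil]
    rw [innerA (m : Int) (PySem.List.pyRange (m : Int) n)]
    show _ = (applyW ((legsSt n m).2.2 ++ legW (legsSt n m).1 (dirOf (PySem.Int.mod (m : Int) 3)) (legsSt n m).2.1 ((n - (m : Int)).toNat)) a0, _, _, _)
    rw [applyW_append]
    refine Prod.ext ?_ (Prod.ext ?_ (Prod.ext ?_ ?_)) <;> dsimp only <;>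
      rw [PySem.List.length_pyRange_one] <;> rfl

theorem legsSt_num (n : Int) :
    ∀ m : Nat, (m : Int) ≤ n →
      2 * (legsSt n m).2.1 = 2 + 2 * (m : Int) * n - (m : Int) * ((m : Int) - 1) := by
  intro m
  induction m with
  | zero => intro _; simp [legsSt]
  | succ m ih =>
    intro hm1
    have hm : (m : Int) ≤ n := by push_cast at hm1 ⊢; omega
    have hL : (((n - (m : Int)).toNat : Int)) = n - (m : Int) := by
      push_cast at hm1; omega
    have h := ih hm
    show 2 * ((legsSt n m).2.1 + ((n - (m : Int)).toNat : Int)) = _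
    rw [hL]
    push_cast
    linarith

theorem legsSt_pos (n : Int) :
    ∀ m : Nat, (m : Int) ≤ n → (legsSt n m).1 = posF n m := by
  intro m
  induction m with
  | zero => intro _; simp [legsSt, posF]
  | succ m ih =>
    intro hm1
    have hm : (m : Int) ≤ n := by push_cast at hm1 ⊢; omega
    have hL : (((n - (m : Int)).toNat : Int)) = n - (m : Int) := by
      push_cast at hm1; omega
    have hp := ih hm
    have hq : ∀ r : Nat, m % 3 = r → PySem.Int.mod (m : Int) 3 = (r : Int) := by
      intro r hr; rw [mod3_natCast, hr]
    show ((legsSt n m).1.1 + ((n - (m : Int)).toNat : Int) * _, (legsSt n m).1.2 + ((n - (m : Int)).toNat : Int) * _) = _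
    rw [hp, hL]
    have h3 : m % 3 = 0 ∨ m % 3 = 1 ∨ m % 3 = 2 := by omega
    rcases h3 with hr | hr | hr
    · have hr1 : (m + 1) % 3 = 1 := by omega
      have hd1 : (m + 1) / 3 = m / 3 := by omega
      rw [hq _ hr]
      simp only [posF, hr, hr1, hd1]
      norm_num [dirOf]
      omega
    · have hr1 : (m + 1) % 3 = 2 := by omega
      have hd1 : (m + 1) / 3 = m / 3 := by omega
      rw [hq _ hr]
      simp only [posF, hr, hr1, hd1]
      norm_num [dirOf]
      omega
    · have hr1 : (m + 1) % 3 = 0 := by omega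
      have hd1 : (m + 1) / 3 = m / 3 + 1 := by omega
      rw [hq _ hr]
      simp only [posF, hr, hr1, hd1]
      norm_num [dirOf]
      omega

theorem legsSt_keys (n : Int) :
    ∀ m : Nat, (m : Int) ≤ n →
      ∀ e ∈ (legsSt n m).2.2, 0 ≤ e.1.2 ∧ e.1.2 ≤ e.1.1 ∧ e.1.1 < n := by
  intro m
  induction m with
  | zero => intro _ e he; simp [legsSt] at he
  | succ m ih =>
    intro hm1 e he
    have hm : (m : Int) ≤ n := by push_cast at hm1 ⊢; omega
    have hL : (((n - (m : Int)).toNat : Int)) = n - (m : Int) := by push_cast at hm1; omega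
    have hsplit : (legsSt n (m + 1)).2.2
        = (legsSt n m).2.2 ++ legW (legsSt n m).1 (dirOf (PySem.Int.mod (m : Int) 3))
            (legsSt n m).2.1 ((n - (m : Int)).toNat) := rfl
    rw [hsplit] at he
    rcases List.mem_append.mp he with h | h
    · exact ih hm e h
    · rw [legW_eq_map] at h
      obtain ⟨k, hk, hke⟩ := List.mem_map.mp h
      have hkL : (k : Int) < n - (m : Int) := by
        rw [← hL]; exact_mod_cast List.mem_range.mp hk
      rw [legsSt_pos n m hm, mod3_natCast] at hke
      rw [← hke]
      have h3 : m % 3 = 0 ∨ m % 3 = 1 ∨ m % 3 = 2 := by omega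
      rcases h3 with hr | hr | hr <;>
        · simp only [posF, hr]
          norm_num [dirOf]
          omega

-- membership in the accumulated write list, in terms of (leg, step)
theorem mem_writes_iff (n : Int) (M : Nat) (e : (Int × Int) × Int) :
    (M : Int) ≤ n →
    (e ∈ (legsSt n M).2.2 ↔
      ∃ m : Nat, m < M ∧ ∃ k : Nat, (k : Int) < n - (m : Int) ∧ e = (wKey n m k, wVal n m k)) := by
  induction M with
  | zero => intro _; simp [legsSt]
  | succ M ih =>
    intro hM
    have hM' : (M : Int) ≤ n := by push_cast at hM ⊢; omega
    have hL : (((n - (M : Int)).toNat : Int)) = n - (M : Int) := by push_cast at hM; omega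
    have hsplit : (legsSt n (M + 1)).2.2
        = (legsSt n M).2.2 ++ legW (legsSt n M).1 (dirOf (PySem.Int.mod (M : Int) 3))
            (legsSt n M).2.1 ((n - (M : Int)).toNat) := rfl
    rw [hsplit, List.mem_append, ih hM']
    constructor
    · rintro (⟨m, hm, hk⟩ | h)
      · exact ⟨m, by omega, hk⟩
      · rw [legW_eq_map] at h
        obtain ⟨k, hk, hke⟩ := List.mem_map.mp h
        refine ⟨M, by omega, k, ?_, ?_⟩
        · rw [← hL]; exact_mod_cast List.mem_range.mp hk
        · rw [legsSt_pos n M hM', mod3_natCast] at hke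
          rw [← hke]; rfl
    · rintro ⟨m, hm, k, hk, hke⟩
      by_cases hmm : m < M
      · exact Or.inl ⟨m, hmm, k, hk, hke⟩
      · have hEq : m = M := by omega
        subst hEq
        right
        rw [legW_eq_map, legsSt_pos n m hM', mod3_natCast]
        refine List.mem_map.mpr ⟨k, List.mem_range.mpr ?_, ?_⟩
        · omega
        · rw [hke]; rfl

theorem fw_mem {w : List ((Int × Int) × Int)} {k : Int × Int} {x : Int}
    (h : fw w k = some x) : (k, x) ∈ w := by
  induction w with
  | nil => simp [fw] at h
  | cons e w ih =>
    rw [fw_cons] at h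
    rcases hf : fw w k with _ | v
    · rw [hf] at h
      simp only [Option.none_or] at h
      by_cases he : e.1 = k
      · rw [if_pos he] at h
        simp only [Option.some_inj] at h
        have hek : e = (k, x) := by cases e; simp_all
        rw [hek]
        exact List.mem_cons_self
      · rw [if_neg he] at h; simp at h
    · rw [hf] at h
      simp only [Option.some_or, Option.some_inj] at h
      subst h
      exact List.mem_cons_of_mem _ (ih hf)

theorem fw_eq_some {w : List ((Int × Int) × Int)} {k : Int × Int} {v : Int}
    (h1 : (k, v) ∈ w) (h2 : ∀ x, (k, x) ∈ w → x = v) : fw w k = some v := by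
  induction w with
  | nil => simp at h1
  | cons e w ih =>
    rw [fw_cons]
    by_cases hw : (k, v) ∈ w
    · rw [ih hw (fun x hx => h2 x (List.mem_cons_of_mem _ hx))]
      simp [Option.or]
    · have hek : e = (k, v) := by
        rcases List.mem_cons.mp h1 with h | h
        · exact h.symm
        · exact absurd h hw
      subst hek
      have hwn : fw w k = none := by
        rcases hf : fw w k with _ | x
        · rfl
        · have hm := fw_mem hf
          have hx := h2 x (List.mem_cons_of_mem _ hm)
          subst hx
          exact absurd hm hw
      rw [hwn]
      simp [Option.or]

-- exact halving of t*(t+1)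
theorem floordiv_tri (t : Int) : 2 * PySem.Int.floordiv (t * (t + 1)) 2 = t * (t + 1) := by
  rw [PySem.Int.floordiv_eq_ediv_of_pos (by norm_num)]
  have hdvd : (2 : Int) ∣ t * (t + 1) := (Int.even_mul_succ_self t).two_dvd
  exact Int.mul_ediv_cancel' hdvd

-- pure arithmetic: the closed form on each of the three ring edges
theorem cellB_case0 (n Qi ki : Int) (_hQ : 0 ≤ Qi) (hk : 0 ≤ ki) (hkn : ki ≤ n - 3 * Qi - 1) :
    2 * cellB n (2 * Qi + ki) Qi = 2 + 2 * (3 * Qi) * n - (3 * Qi) * ((3 * Qi) - 1) + 2 * ki := by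
  have hTn := floordiv_tri n
  have hTm := floordiv_tri (n - 3 * Qi)
  simp only [cellB]
  have hmin : min (min Qi (n - 1 - (2 * Qi + ki))) (2 * Qi + ki - Qi) = Qi := by omega
  rw [hmin, if_pos (by omega : Qi - Qi = 0)]
  linear_combination hTn - hTm

theorem cellB_case1 (n Qi ki : Int) (_hQ : 0 ≤ Qi) (hk : 0 ≤ ki) (hkn : ki ≤ n - 3 * Qi - 2) :
    2 * cellB n (n - 1 - Qi) (Qi + ki + 1)
      = 2 + 2 * (3 * Qi + 1) * n - (3 * Qi + 1) * ((3 * Qi + 1) - 1) + 2 * ki := by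
  have hTn := floordiv_tri n
  have hTm := floordiv_tri (n - 3 * Qi)
  simp only [cellB]
  have hmin : min (min (Qi + ki + 1) (n - 1 - (n - 1 - Qi))) (n - 1 - Qi - (Qi + ki + 1)) = Qi := by
    omega
  rw [hmin, if_neg (by omega : ¬ Qi + ki + 1 - Qi = 0),
    if_pos (by omega : n - 1 - Qi - 2 * Qi = n - 3 * Qi - 1)]
  linear_combination hTn - hTm

theorem cellB_case2 (n Qi ki : Int) (_hQ : 0 ≤ Qi) (hk : 0 ≤ ki) (hkn : ki ≤ n - 3 * Qi - 3) :
    2 * cellB n (n - 2 - Qi - ki) (n - 2 - 2 * Qi - ki)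
      = 2 + 2 * (3 * Qi + 2) * n - (3 * Qi + 2) * ((3 * Qi + 2) - 1) + 2 * ki := by
  have hTn := floordiv_tri n
  have hTm := floordiv_tri (n - 3 * Qi)
  simp only [cellB]
  have hmin : min (min (n - 2 - 2 * Qi - ki) (n - 1 - (n - 2 - Qi - ki)))
      (n - 2 - Qi - ki - (n - 2 - 2 * Qi - ki)) = Qi := by omega
  rw [hmin, if_neg (by omega : ¬ n - 2 - 2 * Qi - ki - Qi = 0),
    if_neg (by omega : ¬ n - 2 - Qi - ki - 2 * Qi = n - 3 * Qi - 1)]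
  linear_combination hTn - hTm

-- every write's value is the closed form at its key
theorem wVal_eq_cellB (n : Int) (m k : Nat) (hm : (m : Int) < n) (hk : (k : Int) < n - (m : Int)) :
    wVal n m k = cellB n (wKey n m k).1 (wKey n m k).2 := by
  have hnum := legsSt_num n m (le_of_lt hm)
  set Q : Nat := m / 3 with hQdef
  have hb1 : (0 : Int) ≤ (Q : Int) := by positivity
  have hbk : (0 : Int) ≤ (k : Int) := by positivity
  have h3 : m % 3 = 0 ∨ m % 3 = 1 ∨ m % 3 = 2 := by omega
  rcases h3 with hr | hr | hr
  · have hmQ : (m : Int) = 3 * (Q : Int) := by omega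
    have hkey : wKey n m k = (2 * (Q : Int) + (k : Int), (Q : Int)) := by
      simp only [wKey, posF, hr, dirOf]
      norm_num
      omega
    rw [hkey]
    have hc := cellB_case0 n (Q : Int) (k : Int) hb1 hbk (by omega)
    rw [hmQ] at hnum
    simp only [wVal]
    linarith
  · have hmQ : (m : Int) = 3 * (Q : Int) + 1 := by omega
    have hkey : wKey n m k = (n - 1 - (Q : Int), (Q : Int) + (k : Int) + 1) := by
      simp only [wKey, posF, hr, dirOf]
      norm_num
      omega
    rw [hkey]
    have hc := cellB_case1 n (Q : Int) (k : Int) hb1 hbk (by omega)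
    rw [hmQ] at hnum
    simp only [wVal]
    linarith
  · have hmQ : (m : Int) = 3 * (Q : Int) + 2 := by omega
    have hkey : wKey n m k = (n - 2 - (Q : Int) - (k : Int), n - 2 - 2 * (Q : Int) - (k : Int)) := by
      simp only [wKey, posF, hr, dirOf]
      norm_num
      constructor <;> omega
    rw [hkey]
    have hc := cellB_case2 n (Q : Int) (k : Int) hb1 hbk (by omega)
    rw [hmQ] at hnum
    simp only [wVal]
    linarith

-- every lower-triangle cell is some write's key
theorem cover (n i j : Int) (hj : 0 ≤ j) (hji : j ≤ i) (hin : i < n) :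
    ∃ m : Nat, (m : Int) < n ∧ ∃ k : Nat, (k : Int) < n - (m : Int) ∧ wKey n m k = (i, j) := by
  by_cases h1 : j ≤ i - j ∧ j ≤ n - 1 - i
  · -- left edge of ring j: leg 3j, step i - 2j
    refine ⟨(3 * j).toNat, by omega, (i - 2 * j).toNat, by omega, ?_⟩
    have hm3 : (3 * j).toNat % 3 = 0 := by omega
    have hd3 : (((3 * j).toNat / 3 : Nat) : Int) = j := by omega
    simp only [wKey, posF, hm3, dirOf, hd3]
    norm_num
    omega
  · by_cases h2 : n - 1 - i < j ∧ n - 1 - i ≤ i - j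
    · -- bottom edge of ring n-1-i: leg 3(n-1-i)+1, step j-(n-1-i)-1
      refine ⟨(3 * (n - 1 - i) + 1).toNat, by omega, (j - (n - 1 - i) - 1).toNat, by omega, ?_⟩
      have hm3 : (3 * (n - 1 - i) + 1).toNat % 3 = 1 := by omega
      have hd3 : (((3 * (n - 1 - i) + 1).toNat / 3 : Nat) : Int) = n - 1 - i := by omega
      simp only [wKey, posF, hm3, dirOf, hd3]
      norm_num
      omega
    · -- diagonal edge of ring i-j: leg 3(i-j)+2, step n-2-(i-j)-i
      have h3 : i - j < j ∧ i - j < n - 1 - i := by omega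
      refine ⟨(3 * (i - j) + 2).toNat, by omega, (n - 2 - (i - j) - i).toNat, by omega, ?_⟩
      have hm3 : (3 * (i - j) + 2).toNat % 3 = 2 := by omega
      have hd3 : (((3 * (i - j) + 2).toNat / 3 : Nat) : Int) = i - j := by omega
      simp only [wKey, posF, hm3, dirOf, hd3]
      norm_num
      omega

theorem fw_writes (n i j : Int) (hj : 0 ≤ j) (hji : j ≤ i) (hin : i < n) :
    fw (legsSt n n.toNat).2.2 (i, j) = some (cellB n i j) := by
  have hcast : ((n.toNat : Nat) : Int) = n := Int.toNat_of_nonneg (by omega)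
  apply fw_eq_some
  · obtain ⟨m, hm, k, hk, hkey⟩ := cover n i j hj hji hin
    have hmem := (mem_writes_iff n n.toNat (wKey n m k, wVal n m k) (le_of_eq hcast)).mpr
      ⟨m, by omega, k, hk, rfl⟩
    have hv := wVal_eq_cellB n m k hm hk
    rw [hkey] at hmem hv
    have hv' : wVal n m k = cellB n i j := hv
    rw [hv'] at hmem
    exact hmem
  · intro x hx
    obtain ⟨m, hm, k, hk, he⟩ := (mem_writes_iff n n.toNat _ (le_of_eq hcast)).mp hx
    have hm' : (m : Int) < n := by omega
    have hv := wVal_eq_cellB n m k hm' hk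
    have hkey : wKey n m k = (i, j) := by
      have := congrArg Prod.fst he
      simpa using this.symm
    have hxv : x = wVal n m k := by
      have := congrArg Prod.snd he
      simpa using this
    rw [hkey] at hv
    have hv' : wVal n m k = cellB n i j := hv
    rw [hxv, hv']

theorem shape_a0 (n : Int) :
    Shape n.toNat (fun _ => n.toNat)
      ((PySem.List.pyRange 0 n).map (fun _ => List.replicate n.toNat (0 : Int))) := by
  constructor
  · simp [PySem.List.length_pyRange_one]
  · intro k hk
    simp

theorem solution_spec : Claim_equal_solution := by
  unfold Claim_equal_solution
  intro n _
  unfold Spec_solution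
  by_cases hn : n ≤ 0
  · simp only [solution, solution_alt, PySem.List.pyRange_one_eq_nil hn,
      List.foldl_nil, List.flatMap_nil]
  · have hn0 : (0 : Int) ≤ n := by omega
    have hcast : ((n.toNat : Nat) : Int) = n := Int.toNat_of_nonneg hn0
    simp only [solution, solution_alt]
    have hA := outerA n ((PySem.List.pyRange 0 n).map (fun _ => List.replicate n.toNat (0 : Int)))
      n.toNat (le_of_eq hcast)
    rw [hcast] at hA
    rw [hA]
    dsimp only
    simp only [foldl_append_singleton]
    rw [PySem.List.foldl_append_eq_flatMap, List.nil_append]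
    apply flatMap_congr
    intro i hi
    apply List.map_congr_left
    intro j hj
    obtain ⟨hi0, hin⟩ := PySem.List.mem_pyRange_one.mp hi
    obtain ⟨hj0, hji⟩ := PySem.List.mem_pyRange_one.mp hj
    have hkeys := legsSt_keys n n.toNat (le_of_eq hcast)
    have hwA : ∀ e ∈ (legsSt n n.toNat).2.2,
        0 ≤ e.1.1 ∧ e.1.1 < (n.toNat : Int) ∧ 0 ≤ e.1.2 ∧ e.1.2 < ((n.toNat : Nat) : Int) := by
      intro e he
      have := hkeys e he
      omega
    rw [pyGet2_applyW _ (shape_a0 n) hwA hi0 hj0,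
      fw_writes n i j hj0 (by omega) hin,
      Option.getD_some]
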